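-- pv_equiv track=rewrite | github.com/kgleijm/cardShuffle | cardShuffleExperiment.py | getDistanceBetween
-- ===== SOURCE A (Python) =====
-- def getDistanceBetween(a, b, deck):
--     distance = 0
--     counting = False
--     for e in deck:
--         if counting:
--             distance += 1
--         if (e == a or e == b) and counting:
--             return distance
--         if e == a or e == b:
--             counting = True
-- ===== SOURCE B (Python) =====
-- def getDistanceBetween(a, b, deck):
--     hits = [i for i, e in enumerate(deck) if e == a or e == b]
--     if len(hits) < 2:
--         return None
--     return hits[1] - hits[0]
-- ===== Notes on version B (the rewrite author's own statement) =====
-- stated objective: alternative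
-- what changed: Instead of a stateful scan with a counting flag and distance accumulator, B materialises the full list of indices of elements equal to a or b (enumerate + filter, no early exit) and returns the difference of the first two, or None if fewer than two exist.
import Mathlib
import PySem

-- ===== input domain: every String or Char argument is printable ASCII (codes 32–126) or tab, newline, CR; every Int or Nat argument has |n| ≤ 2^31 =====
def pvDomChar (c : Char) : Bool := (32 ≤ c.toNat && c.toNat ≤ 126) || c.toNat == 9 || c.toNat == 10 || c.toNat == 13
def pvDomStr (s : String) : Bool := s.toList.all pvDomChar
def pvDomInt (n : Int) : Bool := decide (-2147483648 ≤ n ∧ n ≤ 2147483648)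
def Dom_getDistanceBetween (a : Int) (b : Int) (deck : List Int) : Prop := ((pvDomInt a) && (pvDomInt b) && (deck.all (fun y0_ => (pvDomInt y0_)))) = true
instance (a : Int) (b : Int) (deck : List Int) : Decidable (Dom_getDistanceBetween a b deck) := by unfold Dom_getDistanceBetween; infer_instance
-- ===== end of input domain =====

-- B replaces A's stateful scan (counting flag + distance accumulator) by
-- materialising the list of indices of elements equal to a or b and returning
-- the difference of the first two; objective: alternative (same cost).


-- ===== PORT A =====
-- literal transliteration of A's loop: state (distance, counting), early return on
-- a match while counting
def pvAgo (a : Int) (b : Int) : List Int → Int → Bool → Option Int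
  | [], _, _ => none
  | e :: rest, distance, counting =>
    let distance := if counting then distance + 1 else distance
    if (e == a || e == b) && counting then some distance
    else pvAgo a b rest distance (counting || (e == a || e == b))

def getDistanceBetween (a : Int) (b : Int) (deck : List Int) : Option Int :=
  pvAgo a b deck 0 false

-- ===== PORT B =====
-- B: hits = [i for i, e in enumerate(deck) if e == a or e == b]; fewer than two
-- hits -> none, else hits[1] - hits[0]
def getDistanceBetween_alt (a : Int) (b : Int) (deck : List Int) : Option Int :=
  let hits := ((PySem.List.enumerate deck 0).filter (fun p => p.2 == a || p.2 == b)).map (fun p => p.1)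
  match hits with
  | i :: j :: _ => some (j - i)
  | _ => none

-- ===== PRECONDITION & SPEC =====
def Spec_getDistanceBetween (a : Int) (b : Int) (deck : List Int) (out : Option Int) : Prop := out = getDistanceBetween_alt a b deck
instance (a : Int) (b : Int) (deck : List Int) (out : Option Int) : Decidable (Spec_getDistanceBetween a b deck out) := by unfold Spec_getDistanceBetween; infer_instance

-- ===== CLAIM (what is proved, stated in full; the proofs are below) =====
def Claim_equal_getDistanceBetween : Prop := ∀ (a : Int) (b : Int) (deck : List Int), Dom_getDistanceBetween a b deck → Spec_getDistanceBetween a b deck (getDistanceBetween a b deck)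

-- ===== LEMMAS AND PROOFS =====

-- index list of the matches of a or b in l, enumerated from s
def pvHits (a b : Int) (l : List Int) (s : Int) : List Int :=
  ((PySem.List.enumerate l s).filter (fun p => p.2 == a || p.2 == b)).map (fun p => p.1)

-- once counting with accumulator d (started at offset s with d = s - i0 - 1 for the
-- first hit i0), A returns d + 1 + (first hit offset - s); stated via pvHits
theorem pvAgo_true (a b : Int) (l : List Int) : ∀ (d s : Int),
    pvAgo a b l d true = (pvHits a b l s).head?.map (fun j => d + 1 + (j - s)) := by
  induction l with
  | nil => intro d s; rfl
  | cons e rest ih =>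
    intro d s
    simp only [pvAgo, pvHits, PySem.List.enumerate_cons, List.filter_cons]
    by_cases h : (e == a || e == b) = true
    · simp [h]
    · simp only [h, Bool.false_and, Bool.or_false, if_true, Bool.false_eq_true,
        if_false]
      rw [ih (d + 1) (s + 1)]
      simp only [pvHits]
      cases ((PySem.List.enumerate rest (s+1)).filter (fun p => p.2 == a || p.2 == b)).map (fun p => p.1) with
      | nil => rfl
      | cons j t => simp only [List.head?_cons, Option.map_some]; congr 1; ring

-- before any match, A equals B's "first two hits" computation (offset s arbitrary)
theorem pvAgo_false (a b : Int) (l : List Int) : ∀ (s : Int),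
    pvAgo a b l 0 false =
      (match pvHits a b l s with
       | i :: j :: _ => some (j - i)
       | _ => none) := by
  induction l with
  | nil => intro s; rfl
  | cons e rest ih =>
    intro s
    simp only [pvAgo, pvHits, PySem.List.enumerate_cons, List.filter_cons]
    by_cases h : (e == a || e == b) = true
    · simp only [h, Bool.and_false, Bool.false_or, Bool.false_eq_true, if_false,
        if_true, List.map_cons]
      rw [pvAgo_true a b rest 0 (s + 1)]
      have he : List.map (fun p => p.1) (List.filter (fun p => p.2 == a || p.2 == b) (PySem.List.enumerate rest (s + 1))) = pvHits a b rest (s + 1) := rfl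
      rw [he]
      cases pvHits a b rest (s + 1) with
      | nil => rfl
      | cons j t => simp only [List.head?_cons, Option.map_some]; congr 1; ring
    · simp only [h, Bool.false_and, Bool.or_false, Bool.false_eq_true, if_false]
      rw [ih (s + 1)]
      simp only [pvHits]

-- ===== VERDICT (by name: the statement is the Claim_ definition above) =====
theorem getDistanceBetween_spec : Claim_equal_getDistanceBetween := by
  intro a b deck _
  show getDistanceBetween a b deck = getDistanceBetween_alt a b deck
  rw [getDistanceBetween, getDistanceBetween_alt, pvAgo_false a b deck 0]
  rfl
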